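-- pv_equiv track=rewrite | github.com/Xingchen-xin/Gilles-Style-Writing-Assistant | src/gswa/utils/ngram.py | find_longest_match_simple
-- ===== SOURCE A (Python) =====
-- from typing import Set, Tuple
--
-- def get_ngrams(tokens: list[str], n: int) -> list[Tuple[str, ...]]:
--     """Extract n-grams from token list.
--
--     Args:
--         tokens: List of tokens
--         n: N-gram size
--
--     Returns:
--         List of n-gram tuples
--     """
--     if len(tokens) < n:
--         return []
--     return [tuple(tokens[i:i+n]) for i in range(len(tokens) - n + 1)]
--
-- def find_longest_match_simple(
--     candidate_tokens: list[str],
--     corpus_ngram_set: Set[Tuple[str, ...]],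
--     ngram_size: int = 8,
--     max_n: int = 20
-- ) -> int:
--     """Find longest consecutive n-gram match with corpus (simple version).
--
--     This version builds n-grams on the fly from a single base n-gram set.
--     Less efficient but simpler when only one n-gram size is indexed.
--
--     Args:
--         candidate_tokens: Tokenized candidate text
--         corpus_ngram_set: Set of corpus n-grams (at ngram_size)
--         ngram_size: Size of n-grams in corpus_ngram_set
--         max_n: Maximum n-gram size to check
--
--     Returns:
--         Length of longest matching n-gram (0 if no match)
--     """
--     if not candidate_tokens or not corpus_ngram_set:
--         return 0
--
--     # For simple version, we check if candidate n-grams exist in corpus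
--     # We can only reliably detect matches up to ngram_size
--     max_check = min(max_n, len(candidate_tokens), ngram_size)
--
--     for n in range(max_check, 0, -1):
--         candidate_ngrams = get_ngrams(candidate_tokens, n)
--         # Check against corpus n-grams of same size
--         # For sizes smaller than ngram_size, we need to extract sub-ngrams
--         if n == ngram_size:
--             for ngram in candidate_ngrams:
--                 if ngram in corpus_ngram_set:
--                     return n
--         elif n < ngram_size:
--             # Check if any candidate n-gram appears in any corpus n-gram
--             for ngram in candidate_ngrams:
--                 for corpus_ngram in corpus_ngram_set:
--                     # Check if candidate n-gram is a subsequence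
--                     for i in range(len(corpus_ngram) - n + 1):
--                         if corpus_ngram[i:i+n] == ngram:
--                             return n
--
--     return 0
-- ===== SOURCE B (Python) =====
-- def get_ngrams(tokens, n):
--     if len(tokens) < n:
--         return []
--     return [tuple(tokens[i:i+n]) for i in range(len(tokens) - n + 1)]
--
-- def find_longest_match_simple(candidate_tokens, corpus_ngram_set, ngram_size=8, max_n=20):
--     if not candidate_tokens or not corpus_ngram_set:
--         return 0
--     max_check = min(max_n, len(candidate_tokens), ngram_size)
--
--     def matches(n):
--         cand = set(get_ngrams(candidate_tokens, n))
--         if n == ngram_size: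
--             return any(g in corpus_ngram_set for g in cand)
--         return any(
--             corpus_ngram[i:i+n] in cand
--             for corpus_ngram in corpus_ngram_set
--             for i in range(len(corpus_ngram) - n + 1)
--         )
--
--     # matches(n) is monotone decreasing in n, so binary-search the largest
--     # n in [1, max_check] with matches(n); 0 if none matches
--     lo, hi = 0, max_check
--     while lo < hi:
--         mid = (lo + hi + 1) // 2
--         if matches(mid):
--             lo = mid
--         else:
--             hi = mid - 1
--     return lo
-- ===== Notes on version B (the rewrite author's own statement) =====
-- stated objective: faster
-- what changed: Replaces A's linear descending scan over n-gram sizes (with a candidate-by-candidate nested slice comparison per size) by a binary search over sizes using the monotone-decreasing match predicate, whose per-size test scans each corpus sub-n-gram once and looks it up in a set of candidate n-grams.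
import Mathlib
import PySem

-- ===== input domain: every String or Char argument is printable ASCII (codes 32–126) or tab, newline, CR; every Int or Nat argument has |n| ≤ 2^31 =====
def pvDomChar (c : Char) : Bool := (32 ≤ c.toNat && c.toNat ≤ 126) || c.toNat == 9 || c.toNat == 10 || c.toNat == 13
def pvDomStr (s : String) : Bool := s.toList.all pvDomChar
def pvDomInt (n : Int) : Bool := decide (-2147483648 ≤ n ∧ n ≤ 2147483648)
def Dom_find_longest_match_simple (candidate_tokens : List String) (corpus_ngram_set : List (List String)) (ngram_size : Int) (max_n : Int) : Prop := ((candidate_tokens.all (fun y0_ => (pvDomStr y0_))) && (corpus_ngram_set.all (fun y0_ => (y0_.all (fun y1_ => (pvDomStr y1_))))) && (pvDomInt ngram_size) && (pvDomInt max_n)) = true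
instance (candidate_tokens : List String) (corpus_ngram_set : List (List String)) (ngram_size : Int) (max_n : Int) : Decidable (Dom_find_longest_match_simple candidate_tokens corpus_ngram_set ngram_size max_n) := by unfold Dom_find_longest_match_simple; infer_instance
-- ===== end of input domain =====

-- B replaces A's linear descending scan over n-gram sizes by a binary search over sizes
-- (the size-n match predicate is monotone decreasing in n), with the per-size scan
-- looking each corpus sub-n-gram up in a set of candidate n-grams instead of A's
-- candidate-by-candidate nested comparison.

-- ===== PORT A =====
-- shared module helper get_ngrams (used by both Pythons)
def get_ngrams (tokens : List String) (n : Int) : List (List String) :=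
  if (tokens.length : Int) < n then []
  else (PySem.List.pyRange 0 ((tokens.length : Int) - n + 1) 1).map
    (fun i => PySem.List.slice tokens (some i) (some (i + n)))

-- A's `for n in range(max_check, 0, -1)` loop with its early returns
def descendA (candidate_tokens : List String) (corpus_ngram_set : List (List String))
    (ngram_size : Int) (n : Int) : Int :=
  if h : 1 ≤ n then
    let candidate_ngrams := get_ngrams candidate_tokens n
    if n = ngram_size then
      if candidate_ngrams.any (fun g => corpus_ngram_set.contains g) then n
      else descendA candidate_tokens corpus_ngram_set ngram_size (n - 1)
    else if n < ngram_size then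
      if candidate_ngrams.any (fun g => corpus_ngram_set.any (fun c =>
          (PySem.List.pyRange 0 ((c.length : Int) - n + 1) 1).any (fun i =>
            PySem.List.slice c (some i) (some (i + n)) == g))) then n
      else descendA candidate_tokens corpus_ngram_set ngram_size (n - 1)
    else descendA candidate_tokens corpus_ngram_set ngram_size (n - 1)
  else 0
termination_by n.toNat
decreasing_by all_goals omega

def find_longest_match_simple (candidate_tokens : List String) (corpus_ngram_set : List (List String)) (ngram_size : Int) (max_n : Int) : Int :=
  if candidate_tokens.isEmpty || corpus_ngram_set.isEmpty then 0
  else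
    let max_check := min (min max_n (candidate_tokens.length : Int)) ngram_size
    descendA candidate_tokens corpus_ngram_set ngram_size max_check

-- ===== PORT B =====
-- Source B's inner `matches(n)` predicate
def matchesB (candidate_tokens : List String) (corpus_ngram_set : List (List String))
    (ngram_size : Int) (n : Int) : Bool :=
  let cand := PySem.Set.ofList (get_ngrams candidate_tokens n)
  if n = ngram_size then
    cand.any (fun g => corpus_ngram_set.contains g)
  else
    corpus_ngram_set.any (fun c =>
      (PySem.List.pyRange 0 ((c.length : Int) - n + 1) 1).any (fun i =>
        cand.contains (PySem.List.slice c (some i) (some (i + n)))))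

-- midpoint bounds used by the binary search's termination and its invariant proof
theorem bsearch_mid_bounds (lo hi : Int) (h : lo < hi) :
    lo < PySem.Int.floordiv (lo + hi + 1) 2 ∧ PySem.Int.floordiv (lo + hi + 1) 2 ≤ hi := by
  have hdm := PySem.Int.floordiv_mul_add_mod (lo + hi + 1) 2
  have h0 := PySem.Int.mod_nonneg (lo + hi + 1) (b := 2) (by omega)
  have h2 := PySem.Int.mod_lt (lo + hi + 1) (b := 2) (by omega)
  omega

-- Source B's `while lo < hi` binary-search loop
def bsearchB (P : Int → Bool) (lo hi : Int) : Int :=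
  if h : lo < hi then
    let mid := PySem.Int.floordiv (lo + hi + 1) 2
    if P mid then bsearchB P mid hi else bsearchB P lo (mid - 1)
  else lo
termination_by (hi - lo).toNat
decreasing_by
  · have := bsearch_mid_bounds lo hi h; omega
  · have := bsearch_mid_bounds lo hi h; omega

def find_longest_match_simple_alt (candidate_tokens : List String) (corpus_ngram_set : List (List String)) (ngram_size : Int) (max_n : Int) : Int :=
  if candidate_tokens.isEmpty || corpus_ngram_set.isEmpty then 0
  else
    let max_check := min (min max_n (candidate_tokens.length : Int)) ngram_size
    bsearchB (matchesB candidate_tokens corpus_ngram_set ngram_size) 0 max_check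

-- ===== PRECONDITION & SPEC =====
def Spec_find_longest_match_simple (candidate_tokens : List String) (corpus_ngram_set : List (List String)) (ngram_size : Int) (max_n : Int) (out : Int) : Prop := out = find_longest_match_simple_alt candidate_tokens corpus_ngram_set ngram_size max_n
instance (candidate_tokens : List String) (corpus_ngram_set : List (List String)) (ngram_size : Int) (max_n : Int) (out : Int) : Decidable (Spec_find_longest_match_simple candidate_tokens corpus_ngram_set ngram_size max_n out) := by unfold Spec_find_longest_match_simple; infer_instance

-- ===== CLAIM (what is proved, stated in full; the proofs are below) =====
def Claim_equal_find_longest_match_simple : Prop := ∀ (candidate_tokens : List String) (corpus_ngram_set : List (List String)) (ngram_size : Int) (max_n : Int), Dom_find_longest_match_simple candidate_tokens corpus_ngram_set ngram_size max_n → Spec_find_longest_match_simple candidate_tokens corpus_ngram_set ngram_size max_n (find_longest_match_simple candidate_tokens corpus_ngram_set ngram_size max_n)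

-- ===== LEMMAS AND PROOFS =====

theorem mem_get_ngrams {tokens : List String} {g : List String} {n : Int} (h1 : 1 ≤ n) :
    g ∈ get_ngrams tokens n ↔
      ∃ j : ℕ, (j : Int) + n ≤ tokens.length ∧ g = (tokens.drop j).take n.toNat := by
  unfold get_ngrams
  split
  · simp only [List.not_mem_nil, false_iff]
    rintro ⟨j, hj, -⟩
    omega
  · rename_i hlen
    simp only [List.mem_map]
    constructor
    · rintro ⟨i, hi, rfl⟩
      rw [PySem.List.mem_pyRange_one] at hi
      refine ⟨i.toNat, by omega, ?_⟩
      rw [PySem.List.slice_toNat tokens (by omega) (by omega)]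
      congr 1
      omega
    · rintro ⟨j, hj, rfl⟩
      refine ⟨(j : Int), ?_, ?_⟩
      · rw [PySem.List.mem_pyRange_one]; omega
      · rw [PySem.List.slice_toNat tokens (by omega) (by omega)]
        congr 1
        omega
theorem hit_eq (cand : List String) (corpus : List (List String)) (ns n : Int) :
    (if n = ns then
        (get_ngrams cand n).any (fun g => corpus.contains g)
      else
        (get_ngrams cand n).any (fun g => corpus.any (fun c =>
          (PySem.List.pyRange 0 ((c.length : Int) - n + 1) 1).any (fun i =>
            PySem.List.slice c (some i) (some (i + n)) == g)))) =
    matchesB cand corpus ns n := by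
  unfold matchesB
  split
  · rw [Bool.eq_iff_iff]
    simp only [List.any_eq_true, PySem.Set.mem_ofList]
  · rw [Bool.eq_iff_iff]
    simp only [List.any_eq_true, PySem.Set.mem_ofList, PySem.Set.contains_iff, beq_iff_eq]
    constructor
    · rintro ⟨g, hg, c, hc, i, hi, hs⟩
      exact ⟨c, hc, i, hi, hs ▸ hg⟩
    · rintro ⟨c, hc, i, hi, hg⟩
      exact ⟨_, hg, c, hc, i, hi, rfl⟩
theorem matchesB_mono (cand : List String) (corpus : List (List String)) (ns : Int)
    {m n : Int} (hm : 1 ≤ m) (hmn : m ≤ n) (hns : n ≤ ns)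
    (h : matchesB cand corpus ns n = true) : matchesB cand corpus ns m = true := by
  rcases eq_or_lt_of_le hmn with rfl | hlt
  · exact h
  have hmns : m ≠ ns := by omega
  unfold matchesB at h ⊢
  rw [if_neg hmns]
  split at h
  · -- n = ns : a whole candidate n-gram g is in the corpus set; its m-prefix is a slice of g
    simp only [List.any_eq_true, PySem.Set.mem_ofList, PySem.Set.contains_iff, List.contains_iff_mem] at h ⊢
    obtain ⟨g, hg, hgc⟩ := h
    obtain ⟨j, hj, rfl⟩ := (mem_get_ngrams (by omega)).1 hg
    refine ⟨_, hgc, 0, ?_, ?_⟩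
    · rw [PySem.List.mem_pyRange_one]
      have hlen : ((cand.drop j).take n.toNat).length = n.toNat := by
        simp [List.length_take, List.length_drop]; omega
      constructor <;> [omega; rw [hlen]] 
      omega
    · rw [PySem.List.slice_toNat _ (by omega) (by omega)]
      simp only [Int.toNat_zero, List.drop_zero, List.take_take]
      rw [mem_get_ngrams (by omega)]
      refine ⟨j, by omega, ?_⟩
      congr 1
      omega
  · -- n < ns : slice of a corpus c equals a candidate n-gram; shrink both to length m
    simp only [List.any_eq_true, PySem.Set.mem_ofList, PySem.Set.contains_iff] at h ⊢
    obtain ⟨c, hc, i, hi, hin⟩ := h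
    rw [PySem.List.mem_pyRange_one] at hi
    refine ⟨c, hc, i, ?_, ?_⟩
    · rw [PySem.List.mem_pyRange_one]; omega
    · obtain ⟨j, hj, hgd⟩ := (mem_get_ngrams (by omega)).1 hin
      rw [PySem.List.slice_toNat _ (by omega) (by omega)] at hgd
      rw [PySem.List.slice_toNat _ (by omega) (by omega)]
      rw [mem_get_ngrams (by omega)]
      refine ⟨j, by omega, ?_⟩
      have h1 : (i + m).toNat - i.toNat = min m.toNat ((i+n).toNat - i.toNat) := by omega
      rw [h1, ← List.take_take, hgd, List.take_take]
      congr 1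
      omega
theorem descendA_char (cand : List String) (corpus : List (List String)) (ns : Int) :
    ∀ n : Int, n ≤ ns →
    (descendA cand corpus ns n = 0 ∨
      (1 ≤ descendA cand corpus ns n ∧ descendA cand corpus ns n ≤ n ∧
        matchesB cand corpus ns (descendA cand corpus ns n) = true)) ∧
    (∀ k, descendA cand corpus ns n < k → k ≤ n → matchesB cand corpus ns k = false) := by
  intro n
  induction hk : n.toNat using Nat.strong_induction_on generalizing n with
  | _ K IH =>
  intro hns
  have he := hit_eq cand corpus ns n
  rw [descendA]
  split
  · rename_i h1
    by_cases hcase : n = ns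
    · rw [if_pos hcase]
      rw [if_pos hcase] at he
      split
      · rename_i hhit
        refine ⟨Or.inr ⟨h1, le_refl n, by rw [← he]; exact hhit⟩, ?_⟩
        intro k hk1 hk2; exact absurd hk2 (by omega)
      · rename_i hhit
        have hrec := IH (n - 1).toNat (by omega) (n - 1) rfl (by omega)
        refine ⟨?_, ?_⟩
        · rcases hrec.1 with h | ⟨a, b, c⟩
          · exact Or.inl h
          · exact Or.inr ⟨a, by omega, c⟩
        · intro k hk1 hk2
          rcases eq_or_lt_of_le hk2 with rfl | hklt
          · rw [← he]; exact Bool.not_eq_true _ ▸ (by simpa using hhit)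
          · exact hrec.2 k hk1 (by omega)
    · have hlt : n < ns := by omega
      rw [if_neg hcase, if_pos hlt]
      rw [if_neg hcase] at he
      split
      · rename_i hhit
        refine ⟨Or.inr ⟨h1, le_refl n, by rw [← he]; exact hhit⟩, ?_⟩
        intro k hk1 hk2; exact absurd hk2 (by omega)
      · rename_i hhit
        have hrec := IH (n - 1).toNat (by omega) (n - 1) rfl (by omega)
        refine ⟨?_, ?_⟩
        · rcases hrec.1 with h | ⟨a, b, c⟩
          · exact Or.inl h
          · exact Or.inr ⟨a, by omega, c⟩
        · intro k hk1 hk2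
          rcases eq_or_lt_of_le hk2 with rfl | hklt
          · rw [← he]; exact Bool.not_eq_true _ ▸ (by simpa using hhit)
          · exact hrec.2 k hk1 (by omega)
  · rename_i h1
    refine ⟨Or.inl rfl, ?_⟩
    intro k hk1 hk2; exact absurd hk2 (by omega)
theorem bsearchB_char (P : Int → Bool) (mc : Int)
    (mono : ∀ m n : Int, 1 ≤ m → m ≤ n → n ≤ mc → P n = true → P m = true) :
    ∀ lo hi : Int, 0 ≤ lo → lo ≤ hi → hi ≤ mc →
      (lo = 0 ∨ (1 ≤ lo ∧ P lo = true)) →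
      (∀ k, hi < k → k ≤ mc → P k = false) →
      ((bsearchB P lo hi = 0 ∨ (1 ≤ bsearchB P lo hi ∧ P (bsearchB P lo hi) = true)) ∧
        bsearchB P lo hi ≤ mc ∧
        (∀ k, bsearchB P lo hi < k → k ≤ mc → P k = false)) := by
  intro lo hi
  induction hK : (hi - lo).toNat using Nat.strong_induction_on generalizing lo hi with
  | _ K IH =>
  intro h0 hlh hhm hstart habove
  rw [bsearchB]
  dsimp only
  split
  · rename_i hlt
    have hmid := bsearch_mid_bounds lo hi hlt
    split
    · rename_i hP
      exact IH (hi - PySem.Int.floordiv (lo + hi + 1) 2).toNat (by omega) _ hi rfl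
        (by omega) (by omega) hhm (Or.inr ⟨by omega, hP⟩) habove
    · rename_i hP
      refine IH (PySem.Int.floordiv (lo + hi + 1) 2 - 1 - lo).toNat (by omega) lo _ rfl
        h0 (by omega) (by omega) hstart ?_
      intro k hk1 hk2
      by_cases hkhi : hi < k
      · exact habove k hkhi hk2
      · -- mid ≤ k ≤ hi : P k would give P mid by monotonicity
        cases hPk : P k
        · rfl
        · exact absurd (mono (PySem.Int.floordiv (lo + hi + 1) 2) k (by omega) (by omega) (by omega) hPk) (by simpa using hP)
  · rename_i hge
    have : lo = hi := by omega
    exact ⟨hstart, by omega, fun k hk1 hk2 => habove k (by omega) hk2⟩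
-- ===== VERDICT (by name: the statement is the Claim_ definition above) =====
theorem find_longest_match_simple_spec : Claim_equal_find_longest_match_simple := by
  intro cand corpus ns mn _
  unfold Spec_find_longest_match_simple find_longest_match_simple find_longest_match_simple_alt
  split
  · rfl
  dsimp only
  set mc := min (min mn (cand.length : Int)) ns with hmc
  have hmcns : mc ≤ ns := min_le_right _ _
  by_cases h1 : 1 ≤ mc
  · have hA := descendA_char cand corpus ns mc hmcns
    have hB := bsearchB_char (matchesB cand corpus ns) mc
      (fun m n hm hmn hns h => matchesB_mono cand corpus ns hm hmn (by omega) h)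
      0 mc (le_refl 0) (by omega) (le_refl mc) (Or.inl rfl)
      (fun k hk1 hk2 => absurd hk2 (by omega))
    set rA := descendA cand corpus ns mc
    set rB := bsearchB (matchesB cand corpus ns) 0 mc
    rcases lt_trichotomy rA rB with hlt | heq | hgt
    · rcases hB.1 with h | ⟨hb1, hb2⟩
      · omega
      · have := hA.2 rB hlt hB.2.1
        rw [this] at hb2; exact absurd hb2 (by simp)
    · exact heq
    · rcases hA.1 with h | ⟨ha1, ha2, ha3⟩
      · omega
      · have := hB.2.2 rA hgt (by omega)
        rw [this] at ha3; exact absurd ha3 (by simp)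
  · rw [descendA, bsearchB]
    rw [dif_neg (by omega : ¬ (1:Int) ≤ mc), dif_neg (by omega : ¬ (0:Int) < mc)]
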